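-- pv_equiv track=rewrite | github.com/SamFakh/AoC_2025 | AoC_py/day_3.1.py | find_n_largest_digits
-- ===== SOURCE A (Python) =====
-- def find_n_largest_digits(s: str, n: int) -> int:
--     digits = [int(c) for c in s if c.isdigit()]
--     to_remove = len(digits) - n
--     stack = []
--
--     for d in digits:
--         while to_remove > 0 and stack and stack[-1] < d:
--             stack.pop()
--             to_remove -= 1
--         stack.append(d)
--
--     result_digits = stack[:n]
--
--     result = int("".join(map(str, result_digits)))
--     return result
-- ===== SOURCE B (Python) =====
-- def find_n_largest_digits(s: str, n: int) -> int:
--     digits = [int(c) for c in s if c.isdigit()]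
--     k = min(n, len(digits))
--     def pick(ds, k):
--         if k <= 0:
--             return []
--         window = ds[:len(ds) - k + 1]
--         m = max(window)
--         i = window.index(m)
--         return [m] + pick(ds[i + 1:], k - 1)
--     return int("".join(map(str, pick(digits, k))))
-- ===== Notes on version B (the rewrite author's own statement) =====
-- stated objective: alternative
-- what changed: Replaces the monotonic-stack loop with a removal budget by recursive window-greedy selection (for each output position take the leftmost maximum of the feasible window and recurse past it); Pre_ excludes inputs with no digit, where A raises ValueError on int(''), and n <= 0, where A usually raises on int('') and any returned value is an accident of Python negative-slice truncation of the stack -- B raises ValueError there.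
-- outside the precondition, e.g. on find_n_largest_digits('321', -1): A returns 32, B raises ValueError
import Mathlib
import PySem

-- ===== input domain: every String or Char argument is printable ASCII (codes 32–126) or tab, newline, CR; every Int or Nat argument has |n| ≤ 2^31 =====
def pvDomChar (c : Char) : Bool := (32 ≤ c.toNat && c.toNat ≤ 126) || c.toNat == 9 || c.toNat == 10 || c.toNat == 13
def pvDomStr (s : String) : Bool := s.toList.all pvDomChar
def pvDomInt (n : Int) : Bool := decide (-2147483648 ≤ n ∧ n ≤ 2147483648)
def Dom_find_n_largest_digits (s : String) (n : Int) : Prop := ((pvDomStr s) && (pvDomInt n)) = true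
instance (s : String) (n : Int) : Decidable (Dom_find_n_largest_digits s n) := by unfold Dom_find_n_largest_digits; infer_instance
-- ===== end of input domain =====

-- B replaces A's monotonic-stack-with-removal-budget loop by recursive window-greedy selection
-- (same cost class, different algorithm); return values agree on Pre_ (n ≥ 1 and s contains a digit).

-- ===== PORT A =====
-- digits = [int(c) for c in s if c.isdigit()]   (shared by both Pythons verbatim)
def pvDigits (s : String) : List Int :=
  (s.toList.filter (fun c => PySem.Chars.isdigit c)).map
    (fun c => (PySem.Int.ofChars? [c]).getD 0)   -- int(c); the guard guarantees `some`

-- result = int("".join(map(str, ds)))   (shared by both Pythons verbatim); int('') would raise: Pre_ excludes it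
def pvJoinInt (ds : List Int) : Int :=
  (PySem.Int.ofChars? (PySem.Chars.join [] (ds.map PySem.Int.toChars))).getD 0

-- while to_remove > 0 and stack and stack[-1] < d: stack.pop(); to_remove -= 1
-- stack is kept bottom-first, exactly like the Python list (pop/peek at the back).
def pvPop (d : Int) (r : Int) (st : List Int) : Int × List Int :=
  if h : 0 < r ∧ st ≠ [] ∧ st.getLastD 0 < d then pvPop d (r - 1) st.dropLast
  else (r, st)
termination_by st.length
decreasing_by
  have hne : st ≠ [] := h.2.1
  have := List.length_pos_iff.mpr hne
  simp only [List.length_dropLast]; omega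

-- one iteration of A's for-loop: the while loop, then stack.append(d)
def pvStepA (acc : Int × List Int) (d : Int) : Int × List Int :=
  ((pvPop d acc.1 acc.2).1, (pvPop d acc.1 acc.2).2 ++ [d])

def find_n_largest_digits (s : String) (n : Int) : Int :=
  let digits := pvDigits s
  let to_remove : Int := (digits.length : Int) - n
  let stack := (digits.foldl pvStepA (to_remove, ([] : List Int))).2
  let result_digits := PySem.List.slice stack none (some n)   -- stack[:n]
  pvJoinInt result_digits

-- ===== PORT B =====
-- def pick(ds, k): leftmost maximum of the feasible window, then recurse past it
def pvPick (ds : List Int) (k : Int) : List Int :=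
  if _hk : k ≤ 0 then []
  else
    let window := PySem.List.slice ds none (some ((ds.length : Int) - k + 1))  -- ds[:len(ds)-k+1]
    match PySem.List.max? window (fun x => x) with
    | none => []        -- unreachable from find_n_largest_digits_alt (Python max([]) would raise)
    | some m =>
      match PySem.List.index? window m with
      | none => []      -- unreachable: m is an element of window
      | some i => m :: pvPick (PySem.List.slice ds (some ((i : Int) + 1)) none) (k - 1)  -- ds[i+1:]
termination_by k.toNat
decreasing_by omega

def find_n_largest_digits_alt (s : String) (n : Int) : Int :=
  let digits := pvDigits s
  let k := min n ((digits.length : Int))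
  pvJoinInt (pvPick digits k)

-- ===== PRECONDITION & SPEC =====
-- Pre_ excludes inputs with no digit (A raises ValueError on int('')) and n ≤ 0, where A usually
-- raises on int('') and any returned value is an accident of Python negative-slice truncation.
def Pre_find_n_largest_digits (s : String) (n : Int) : Prop :=
  1 ≤ n ∧ s.toList.any (fun c => PySem.Chars.isdigit c) = true
instance (s : String) (n : Int) : Decidable (Pre_find_n_largest_digits s n) := by
  unfold Pre_find_n_largest_digits; infer_instance

def pvWitness_find_n_largest_digits : String × Int := ("8316", 2)

def Spec_find_n_largest_digits (s : String) (n : Int) (out : Int) : Prop := out = find_n_largest_digits_alt s n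
instance (s : String) (n : Int) (out : Int) : Decidable (Spec_find_n_largest_digits s n out) := by unfold Spec_find_n_largest_digits; infer_instance

-- ===== CLAIM (what is proved, stated in full; the proofs are below) =====
def Claim_equal_find_n_largest_digits : Prop := ∀ (s : String) (n : Int), Dom_find_n_largest_digits s n → Pre_find_n_largest_digits s n → Spec_find_n_largest_digits s n (find_n_largest_digits s n)

-- ===== LEMMAS AND PROOFS =====

theorem pvPop_nopop (d r : Int) (st : List Int) (hr : r ≤ 0) : pvPop d r st = (r, st) := by
  have hcond : ¬ (0 < r ∧ st ≠ [] ∧ st.getLastD 0 < d) := fun h => absurd h.1 (by omega)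
  rw [pvPop, dif_neg hcond]

theorem pvPop_budget (d r : Int) (st : List Int) :
    (pvPop d r st).1 = r + ((pvPop d r st).2.length : Int) - (st.length : Int) := by
  induction st using List.reverseRecOn generalizing r with
  | nil => rw [pvPop, dif_neg (by simp)]; simp
  | append_singleton ys y ih =>
      rw [pvPop]
      split
      · simp only [List.dropLast_concat, List.length_append, List.length_cons, List.length_nil]
        have := ih (r - 1)
        omega
      · simp

theorem pvPop_subset (d r : Int) (st : List Int) : ∀ x ∈ (pvPop d r st).2, x ∈ st := by
  induction st using List.reverseRecOn generalizing r with
  | nil => rw [pvPop, dif_neg (by simp)]; simp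
  | append_singleton ys y ih =>
      rw [pvPop]
      split
      · simp only [List.dropLast_concat]
        intro x hx
        exact List.mem_append_left _ (ih (r - 1) x hx)
      · simp

theorem pvPop_popall (d r : Int) (st : List Int)
    (hlt : ∀ x ∈ st, x < d) (hr : (st.length : Int) ≤ r) :
    pvPop d r st = (r - st.length, []) := by
  induction st using List.reverseRecOn generalizing r with
  | nil => rw [pvPop, dif_neg (by simp)]; simp
  | append_singleton ys y ih =>
      have hlen : ((ys ++ [y]).length : Int) = (ys.length : Int) + 1 := by simp
      have hy : y < d := hlt y (by simp)
      rw [pvPop, dif_pos ⟨by omega, by simp, by simpa using hy⟩, List.dropLast_concat,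
        ih (r - 1) (fun x hx => hlt x (List.mem_append_left _ hx)) (by omega)]
      simp only [Prod.mk.injEq, and_true, List.length_append, List.length_cons, List.length_nil]
      omega

theorem pvPop_cons_bottom (d r m : Int) (st : List Int)
    (h : r ≤ (st.length : Int) ∨ ¬ m < d) :
    pvPop d r (m :: st) = ((pvPop d r st).1, m :: (pvPop d r st).2) := by
  induction st using List.reverseRecOn generalizing r with
  | nil =>
      have h' : r ≤ 0 ∨ ¬ m < d := by simpa using h
      rw [pvPop, dif_neg (by rintro ⟨h1, -, h3⟩; simp at h3; rcases h' with h'|h' <;> [omega; exact h' h3])]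
      rw [pvPop, dif_neg (by rintro ⟨-, h2, -⟩; exact h2 rfl)]
  | append_singleton ys y ih =>
      have hlast : (m :: (ys ++ [y])).getLastD 0 = y := by
        rw [← List.cons_append, List.getLastD_concat]
      have hdrop : (m :: (ys ++ [y])).dropLast = m :: ys := by
        rw [← List.cons_append, List.dropLast_concat]
      by_cases hC : 0 < r ∧ y < d
      · rw [pvPop, dif_pos ⟨hC.1, by simp, by rw [hlast]; exact hC.2⟩, hdrop]
        conv_rhs => rw [pvPop, dif_pos ⟨hC.1, by simp, by rw [List.getLastD_concat]; exact hC.2⟩]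
        rw [List.dropLast_concat]
        refine ih (r - 1) ?_
        rcases h with h|h
        · left; simp only [List.length_append, List.length_cons, List.length_nil] at h; omega
        · right; exact h
      · rw [pvPop, dif_neg (by rintro ⟨h1, -, h3⟩; rw [hlast] at h3; exact hC ⟨h1, h3⟩)]
        conv_rhs => rw [pvPop, dif_neg (by rintro ⟨h1, -, h3⟩; rw [List.getLastD_concat] at h3; exact hC ⟨h1, h3⟩)]

theorem pvFold_budget (l : List Int) : ∀ (r : Int) (st : List Int),
    (l.foldl pvStepA (r, st)).1
      = r + ((l.foldl pvStepA (r, st)).2.length : Int) - (st.length : Int) - (l.length : Int) := by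
  induction l with
  | nil => intro r st; simp
  | cons d t ih =>
      intro r st
      simp only [List.foldl_cons, List.length_cons]
      have h1 := ih (pvStepA (r, st) d).1 (pvStepA (r, st) d).2
      have h2 := pvPop_budget d r st
      simp only [pvStepA] at h1 ⊢
      rw [h1]
      simp only [List.length_append, List.length_cons, List.length_nil]
      omega

theorem pvFold_subset (l : List Int) : ∀ (r : Int) (st : List Int),
    ∀ x ∈ (l.foldl pvStepA (r, st)).2, x ∈ st ∨ x ∈ l := by
  induction l with
  | nil => intro r st x hx; exact Or.inl hx
  | cons d t ih =>
      intro r st x hx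
      simp only [List.foldl_cons] at hx
      rcases ih _ _ x hx with h | h
      · simp only [List.mem_append, List.mem_cons] at h
        rcases h with h | h
        · exact Or.inl (pvPop_subset d r st x h)
        · simp at h; subst h; right; simp
      · right; simp [h]

theorem pvFold_nopop (l : List Int) : ∀ (r : Int) (st : List Int), r ≤ 0 →
    l.foldl pvStepA (r, st) = (r, st ++ l) := by
  induction l with
  | nil => intro r st _; simp
  | cons d t ih =>
      intro r st hr
      simp only [List.foldl_cons, pvStepA, pvPop_nopop d r st hr]
      -- after nopop the state is (r, st ++ [d])
      rw [ih r (st ++ [d]) hr]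
      simp

theorem pvFold_phase1 (m : Int) (pre : List Int) (r : Int)
    (hlt : ∀ x ∈ pre, x < m) (hr : (pre.length : Int) ≤ r) :
    (pre ++ [m]).foldl pvStepA (r, ([] : List Int)) = (r - pre.length, [m]) := by
  rw [List.foldl_append]
  set p := pre.foldl pvStepA (r, ([] : List Int)) with hp
  have hbud := pvFold_budget pre r []
  rw [← hp] at hbud
  simp only [List.length_nil, Nat.cast_zero] at hbud
  have hsub : ∀ x ∈ p.2, x < m := by
    intro x hx
    rcases pvFold_subset pre r [] x (by rw [← hp] at *; exact hx) with h | h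
    · simp at h
    · exact hlt x h
  have hall := pvPop_popall m p.1 p.2 hsub (by omega)
  simp only [List.foldl_cons, List.foldl_nil, pvStepA, hall]
  simp only [Prod.mk.injEq, List.nil_append, and_true]
  omega

theorem pvFold_lock (m : Int) : ∀ (rest : List Int) (b : Int) (st : List Int),
    (∀ j (hj : j < rest.length), m < rest[j] → b ≤ (st.length : Int) + (j : Int)) →
    rest.foldl pvStepA (b, m :: st)
      = ((rest.foldl pvStepA (b, st)).1, m :: (rest.foldl pvStepA (b, st)).2) := by
  intro rest
  induction rest with
  | nil => intro b st _; rfl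
  | cons d t ih =>
      intro b st hsafe
      have hstep : pvPop d b (m :: st) = ((pvPop d b st).1, m :: (pvPop d b st).2) := by
        refine pvPop_cons_bottom d b m st ?_
        by_cases hmd : m < d
        · left; simpa using hsafe 0 (by simp) hmd
        · right; exact hmd
      simp only [List.foldl_cons, pvStepA, hstep]
      have hbud := pvPop_budget d b st
      rw [show m :: (pvPop d b st).2 ++ [d] = m :: ((pvPop d b st).2 ++ [d]) from rfl]
      refine ih (pvPop d b st).1 ((pvPop d b st).2 ++ [d]) ?_
      intro j hj hmj
      have := hsafe (j + 1) (by simpa using Nat.succ_lt_succ hj) (by simpa using hmj)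
      simp only [List.length_append, List.length_cons, List.length_nil]
      push_cast at this ⊢
      omega

theorem pv_core : ∀ (N : Nat) (l : List Int) (k : Nat), l.length ≤ N → 0 < k → k ≤ l.length →
    ((l.foldl pvStepA (((l.length : Int) - (k : Int)), ([] : List Int))).2).take k
      = pvPick l (k : Int) := by
  intro N
  induction N with
  | zero => intro l k hN hk hkl; omega
  | succ N ih =>
    intro l k hN hk hkl
    have hwlen : (l.take (l.length - k + 1)).length = l.length - k + 1 := by
      rw [List.length_take]; omega
    set w := l.take (l.length - k + 1) with hw
    have hwne : w ≠ [] := by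
      intro h; rw [h] at hwlen; simp at hwlen
    obtain ⟨m, hm⟩ : ∃ m, PySem.List.max? w (fun x => x) = some m := by
      cases h : PySem.List.max? w (fun x => x) with
      | none => exact absurd ((PySem.List.max?_eq_none_iff _ _).mp h) hwne
      | some m => exact ⟨m, rfl⟩
    have hmax : ∀ y ∈ w, y ≤ m := PySem.List.max?_isMax hm
    have hmem : m ∈ w := PySem.List.max?_mem hm
    obtain ⟨i, hi⟩ : ∃ i, PySem.List.index? w m = some i :=
      Option.isSome_iff_exists.mp ((PySem.List.index?_isSome_iff _ _).mpr hmem)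
    obtain ⟨hilt, hwi, hfirst⟩ := PySem.List.getElem_of_index?_eq_some hi
    have hiL : i ≤ l.length - k := by omega
    have hidx : i < l.length := by omega
    have hlim : l[i]'hidx = m := by rw [← hwi]; simp [hw]
    -- the element-wise facts about l
    have hlj : ∀ j, j < l.length - k + 1 → ∀ (hj : j < l.length), l[j]'hj ≤ m := by
      intro j hjw hj
      have : w[j]'(by omega) = l[j]'hj := by simp [hw]
      rw [← this]; exact hmax _ (List.getElem_mem _)
    have hlj_lt : ∀ j, j < i → ∀ (hj : j < l.length), l[j]'hj < m := by
      intro j hji hj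
      have hjw : j < l.length - k + 1 := by omega
      have heq : w[j]'(by omega) = l[j]'hj := by simp [hw]
      have hne := hfirst j hji
      rw [heq] at hne
      exact lt_of_le_of_ne (hlj j hjw hj) hne
    -- decomposition l = pre ++ m :: rest
    have hdecomp : l = (l.take i ++ [m]) ++ l.drop (i + 1) := by
      rw [show (l.take i ++ [m]) ++ l.drop (i + 1) = l.take i ++ m :: l.drop (i + 1) by simp]
      conv_lhs => rw [← List.take_append_drop i l]
      rw [← List.getElem_cons_drop hidx, hlim]
    have hprelen : (l.take i).length = i := by rw [List.length_take]; omega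
    have hrestlen : (l.drop (i + 1)).length = l.length - i - 1 := by
      rw [List.length_drop]; omega
    -- A-side: phase 1 collapses the prefix
    have hA1 : ((l.take i) ++ [m]).foldl pvStepA (((l.length : Int) - k), ([] : List Int))
        = ((l.length : Int) - k - i, [m]) := by
      rw [pvFold_phase1 m _ _ ?_ ?_, hprelen]
      · intro x hx
        obtain ⟨j, hj, hje⟩ := List.mem_iff_getElem.mp hx
        rw [hprelen] at hj
        have : (l.take i)[j]'(by omega) = l[j]'(by omega) := List.getElem_take
        rw [this] at hje
        rw [← hje]; exact hlj_lt j hj _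
      · rw [hprelen]; omega
    have hsafe : ∀ j (hj : j < (l.drop (i+1)).length), m < (l.drop (i+1))[j] →
        (l.length : Int) - k - i ≤ (([] : List Int).length : Int) + (j : Int) := by
      intro j hj hmj
      by_contra hcon
      rw [not_le] at hcon
      simp only [List.length_nil, Nat.cast_zero, zero_add] at hcon
      have hjlt : i + 1 + j < l.length - k + 1 := by omega
      have : (l.drop (i+1))[j] = l[i + 1 + j]'(by omega) := List.getElem_drop
      rw [this] at hmj
      exact absurd (hlj _ hjlt _) (not_le.mpr hmj)
    have hA : l.foldl pvStepA (((l.length : Int) - k), ([] : List Int))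
        = (((l.drop (i+1)).foldl pvStepA ((l.length : Int) - k - i, ([] : List Int))).1,
           m :: ((l.drop (i+1)).foldl pvStepA ((l.length : Int) - k - i, ([] : List Int))).2) := by
      have hfold_eq := congrArg
        (fun xs => List.foldl pvStepA (((l.length : Int) - (k : Int)), ([] : List Int)) xs) hdecomp
      simp only at hfold_eq
      rw [hfold_eq, List.foldl_append, hA1, pvFold_lock m _ _ _ hsafe]
    -- B-side: unfold pvPick
    have hwindow : PySem.List.slice l none (some ((l.length : Int) - (k : Int) + 1)) = w := by
      rw [PySem.List.slice_to l (by omega)]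
      congr 1
      omega
    have hrest : PySem.List.slice l (some ((i : Int) + 1)) none = l.drop (i + 1) := by
      rw [PySem.List.slice_from l (by omega)]
      try rw [show ((i : Int) + 1).toNat = i + 1 from by omega]
    have hpick : pvPick l (k : Int) = m :: pvPick (l.drop (i + 1)) ((k : Int) - 1) := by
      rw [pvPick, dif_neg (by omega)]
      simp only [hwindow, hm, hi]
      rw [hrest]
    obtain ⟨k', rfl⟩ : ∃ k', k = k' + 1 := ⟨k - 1, by omega⟩
    rw [hpick, hA]
    rw [List.take_succ_cons]
    congr 1
    rw [show (((k' + 1 : Nat) : Int)) - 1 = (k' : Int) by push_cast; omega]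
    by_cases hk1 : k' = 0
    · subst hk1
      rw [pvPick, dif_pos (by omega)]
      simp
    · have hIH := ih (l.drop (i+1)) k' (by omega) (by omega) (by omega)
      have hb : (((l.drop (i+1)).length : Int) - (k' : Int)) = (l.length : Int) - ((k' + 1 : Nat) : Int) - i := by
        rw [hrestlen]; push_cast; omega
      rw [hb] at hIH
      exact hIH

theorem pv_main (l : List Int) (n : Int) (h1 : 1 ≤ n) (hl : l ≠ []) :
    PySem.List.slice ((l.foldl pvStepA (((l.length : Int) - n), ([] : List Int))).2) none (some n)
      = pvPick l (min n (l.length : Int)) := by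
  have hlpos : 0 < l.length := List.length_pos_iff.mpr hl
  rw [PySem.List.slice_to _ (by omega)]
  by_cases hn : n ≤ (l.length : Int)
  · rw [min_eq_left hn]
    have hcore := pv_core l.length l n.toNat le_rfl (by omega) (by omega)
    rw [show ((n.toNat : Nat) : Int) = n from by omega] at hcore
    exact hcore
  · rw [not_le] at hn
    rw [min_eq_right (le_of_lt hn)]
    rw [pvFold_nopop l ((l.length : Int) - n) [] (by omega)]
    simp only [List.nil_append]
    rw [List.take_of_length_le (by omega : l.length ≤ n.toNat)]
    have hcore := pv_core l.length l l.length le_rfl (by omega) le_rfl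
    rw [pvFold_nopop l ((l.length : Int) - (l.length : Int)) [] (by omega)] at hcore
    simp only [List.nil_append, List.take_length] at hcore
    exact hcore

-- ===== VERDICT (by name: the statement is the Claim_ definition above) =====
theorem find_n_largest_digits_spec : Claim_equal_find_n_largest_digits := by
  intro s n _ hpre
  obtain ⟨h1, hdig⟩ := hpre
  unfold Spec_find_n_largest_digits find_n_largest_digits find_n_largest_digits_alt
  have hne : pvDigits s ≠ [] := by
    rcases List.any_eq_true.mp hdig with ⟨c, hc, hcd⟩
    intro hnil
    have : c ∈ s.toList.filter (fun c => PySem.Chars.isdigit c) := List.mem_filter.mpr ⟨hc, hcd⟩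
    simp only [pvDigits, List.map_eq_nil_iff] at hnil
    rw [hnil] at this; exact List.not_mem_nil this
  exact congrArg pvJoinInt (pv_main (pvDigits s) n h1 hne)
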